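-- pv_equiv track=rewrite | github.com/howard5758/maze_problem | AI2/SensorlessProblem.py | spam_heuristic
-- ===== SOURCE A (Python) =====
-- def spam_heuristic(state):
--     xs = []
--     ys = []
--
--     for i in range(0, len(state[0])):
--         xs.append(state[0][i][0])
--         ys.append(state[0][i][1])
--
--     x_dist = max(xs) - min(xs)
--     y_dist = max(ys) - min(ys)
--
--     return x_dist + y_dist
-- ===== SOURCE B (Python) =====
-- def spam_heuristic(state):
--     xs = sorted(p[0] for p in state[0])
--     ys = sorted(p[1] for p in state[0])
--     return (xs[-1] - xs[0]) + (ys[-1] - ys[0])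
-- ===== Notes on version B (the rewrite author's own statement) =====
-- stated objective: alternative
-- what changed: Sort-then-endpoints: sort each coordinate list once and read the range off as last-minus-first sorted element, instead of an index loop that builds xs/ys and four separate max/min scans.
-- outside the precondition, e.g. on spam_heuristic(([],)): A raises ValueError, B raises IndexError; on spam_heuristic(()): A raises IndexError, B raises IndexError
import Mathlib
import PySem

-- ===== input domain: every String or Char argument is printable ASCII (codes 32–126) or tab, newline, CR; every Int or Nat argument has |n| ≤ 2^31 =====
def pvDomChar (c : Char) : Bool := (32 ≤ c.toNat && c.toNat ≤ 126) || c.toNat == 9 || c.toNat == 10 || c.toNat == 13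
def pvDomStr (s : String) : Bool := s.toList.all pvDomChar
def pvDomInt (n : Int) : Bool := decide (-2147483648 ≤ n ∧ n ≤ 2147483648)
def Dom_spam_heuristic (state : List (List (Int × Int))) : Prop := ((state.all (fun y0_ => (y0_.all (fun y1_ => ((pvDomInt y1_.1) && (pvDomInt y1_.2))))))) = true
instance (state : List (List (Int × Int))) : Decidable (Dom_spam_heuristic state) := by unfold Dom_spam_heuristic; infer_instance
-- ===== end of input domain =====

-- B: sort each coordinate list once and take last-minus-first sorted element,
-- instead of building xs/ys with an index loop and scanning four times with max/min
-- (objective: alternative — sort-then-endpoints instead of extrema scans).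

-- ===== PORT A =====
def spam_heuristic (state : List (List (Int × Int))) : Int :=
  let row := PySem.List.pyGetD state 0 []          -- state[0]; IndexError on [] excluded by Pre_
  let xsys : List Int × List Int :=
    (PySem.List.pyRange 0 (PySem.List.len row) 1).foldl
      (fun acc i =>
        (acc.1 ++ [(PySem.List.pyGetD row i (0, 0)).1],
         acc.2 ++ [(PySem.List.pyGetD row i (0, 0)).2]))
      ([], [])
  -- max([])/min([]) raise ValueError on an empty row; excluded by Pre_
  let x_dist := (PySem.List.max? xsys.1 (fun v => v)).getD 0 - (PySem.List.min? xsys.1 (fun v => v)).getD 0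
  let y_dist := (PySem.List.max? xsys.2 (fun v => v)).getD 0 - (PySem.List.min? xsys.2 (fun v => v)).getD 0
  x_dist + y_dist

-- ===== PORT B =====
def spam_heuristic_alt (state : List (List (Int × Int))) : Int :=
  match state with
  | [] => 0                    -- state[0] raises IndexError in Python; excluded by Pre_
  | row :: _ =>
    let xs := PySem.List.sorted (row.map Prod.fst) (fun v => v) false
    let ys := PySem.List.sorted (row.map Prod.snd) (fun v => v) false
    -- xs[-1]/xs[0] raise IndexError on an empty row; excluded by Pre_
    (PySem.List.pyGetD xs (-1) 0 - PySem.List.pyGetD xs 0 0)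
      + (PySem.List.pyGetD ys (-1) 0 - PySem.List.pyGetD ys 0 0)

-- ===== PRECONDITION & SPEC =====
-- Pre_ excludes the inputs where A raises: empty state (IndexError) and empty first row (ValueError from max([])).
def Pre_spam_heuristic (state : List (List (Int × Int))) : Prop :=
  state ≠ [] ∧ state.headD [] ≠ []
instance (state : List (List (Int × Int))) : Decidable (Pre_spam_heuristic state) := by
  unfold Pre_spam_heuristic; infer_instance
def pvWitness_spam_heuristic : (List (List (Int × Int))) := [[(1, 2), (4, 0)]]

def Spec_spam_heuristic (state : List (List (Int × Int))) (out : Int) : Prop := out = spam_heuristic_alt state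
instance (state : List (List (Int × Int))) (out : Int) : Decidable (Spec_spam_heuristic state out) := by unfold Spec_spam_heuristic; infer_instance

-- ===== CLAIM (what is proved, stated in full; the proofs are below) =====
def Claim_equal_spam_heuristic : Prop := ∀ (state : List (List (Int × Int))), Dom_spam_heuristic state → Pre_spam_heuristic state → Spec_spam_heuristic state (spam_heuristic state)

-- ===== LEMMAS AND PROOFS =====

-- the pair-of-lists loop of A builds exactly the two maps
theorem pv_foldl_pair_append (l : List Int) (f g : Int → Int) (a b : List Int) :
    l.foldl (fun (acc : List Int × List Int) i => (acc.1 ++ [f i], acc.2 ++ [g i])) (a, b)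
      = (a ++ l.map f, b ++ l.map g) := by
  induction l generalizing a b with
  | nil => simp
  | cons x t ih => simp [List.foldl_cons, ih]

theorem pv_map_fst_of {l : List Int} {g : Int → Int × Int} {r : List (Int × Int)}
    (h : l.map g = r) : l.map (fun i => (g i).1) = r.map Prod.fst := by
  rw [← h, List.map_map]; rfl

theorem pv_map_snd_of {l : List Int} {g : Int → Int × Int} {r : List (Int × Int)}
    (h : l.map g = r) : l.map (fun i => (g i).2) = r.map Prod.snd := by
  rw [← h, List.map_map]; rfl

-- in a ≤-sorted list every element is at most the last one
theorem pv_pairwise_le_getLast (l : List Int) (h : l ≠ []) (hp : l.Pairwise (· ≤ ·)) :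
    ∀ y ∈ l, y ≤ l.getLast h := by
  induction l with
  | nil => exact absurd rfl h
  | cons a t ih =>
    rcases List.pairwise_cons.mp hp with ⟨ha, ht⟩
    intro y hy
    cases t with
    | nil => simp at hy; simp [hy, List.getLast]
    | cons b t' =>
      have hgl : (a :: b :: t').getLast (by simp) = (b :: t').getLast (by simp) := by
        simp [List.getLast]
      rw [hgl]
      rcases List.mem_cons.mp hy with rfl | hy'
      · exact le_trans (ha _ (List.getLast_mem _)) (le_refl _)
      · exact ih (by simp) ht y hy'

-- head of sorted(x::t) is the running-min value
theorem pv_sorted_head (x : Int) (t : List Int) :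
    PySem.List.pyGetD (PySem.List.sorted (x :: t) (fun v => v) false) 0 0 = t.foldl min x := by
  have hne : PySem.List.sorted (x :: t) (fun v => v) false ≠ [] := by
    intro h; exact absurd ((PySem.List.sorted_eq_nil_iff _ _ _).mp h) (by simp)
  obtain ⟨m, s, hs⟩ := List.exists_cons_of_ne_nil hne
  have hmin : PySem.List.min? (x :: t) (fun v => v) = some (t.foldl min x) :=
    PySem.List.min?_id_cons x t
  have hmmem : m ∈ x :: t := by
    have : m ∈ PySem.List.sorted (x :: t) (fun v => v) false := by rw [hs]; simp
    exact (PySem.List.mem_sorted _ _ _ _).mp this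
  have h1 : t.foldl min x ≤ m := PySem.List.min?_isMin hmin m hmmem
  have h2 : m ≤ t.foldl min x := by
    have hmem : t.foldl min x ∈ x :: t := PySem.List.min?_mem hmin
    exact PySem.List.key_head_sorted_le _ _ hs _ hmem
  rw [hs]
  simp [PySem.List.pyGetD, PySem.List.pyGet?, PySem.List.pyIdx?]
  omega

-- last of sorted(x::t) is the running-max value
theorem pv_sorted_last (x : Int) (t : List Int) :
    PySem.List.pyGetD (PySem.List.sorted (x :: t) (fun v => v) false) (-1) 0 = t.foldl max x := by
  set s := PySem.List.sorted (x :: t) (fun v => v) false with hsdef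
  have hne : s ≠ [] := by
    intro h; exact absurd ((PySem.List.sorted_eq_nil_iff _ _ _).mp h) (by simp)
  have hlen : 0 < s.length := List.length_pos_iff.mpr hne
  have hget : PySem.List.pyGetD s (-1) 0 = s.getLast hne := by
    simp only [PySem.List.pyGetD, PySem.List.pyGet?, PySem.List.pyIdx?]
    have h1 : ¬ (0 : Int) ≤ -1 := by norm_num
    have h2 : -(s.length : Int) ≤ -1 := by omega
    simp only [h1, if_false, h2, if_true]
    have : s.length - (Int.toNat (-(-1))) = s.length - 1 := by norm_num
    rw [this, List.getLast_eq_getElem]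
    simp [List.getElem?_eq_getElem (by omega : s.length - 1 < s.length)]
  have hp : s.Pairwise (fun a b => a ≤ b) := by
    have := PySem.List.sorted_pairwise (xs := x :: t) (key := fun v : Int => v)
    simpa using this
  have hlastmem : s.getLast hne ∈ x :: t := by
    have : s.getLast hne ∈ s := List.getLast_mem hne
    exact (PySem.List.mem_sorted _ _ _ _).mp this
  have hmax : PySem.List.max? (x :: t) (fun v => v) = some (t.foldl max x) :=
    PySem.List.max?_id_cons x t
  have h1 : s.getLast hne ≤ t.foldl max x := PySem.List.max?_isMax hmax _ hlastmem
  have h2 : t.foldl max x ≤ s.getLast hne := by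
    have hmem : t.foldl max x ∈ s := by
      rw [hsdef, PySem.List.mem_sorted _ _ _ _]; exact PySem.List.max?_mem hmax
    exact pv_pairwise_le_getLast s hne hp _ hmem
  omega

-- ===== VERDICT (by name: the statement is the Claim_ definition above) =====
theorem spam_heuristic_spec : Claim_equal_spam_heuristic := by
  intro state hdom hpre
  obtain ⟨hne, hrow⟩ := hpre
  match state with
  | [] => exact absurd rfl hne
  | row :: tl =>
    match row with
    | [] => exact absurd rfl hrow
    | (x0, y0) :: rest =>
      unfold Spec_spam_heuristic spam_heuristic spam_heuristic_alt
      have hstate : PySem.List.pyGetD (((x0, y0) :: rest) :: tl) 0 ([] : List (Int × Int))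
          = (x0, y0) :: rest := by
        simp [PySem.List.pyGetD, PySem.List.pyGet?, PySem.List.pyIdx?]
      simp only [hstate]
      rw [pv_foldl_pair_append]
      have hx : (PySem.List.pyRange 0 (PySem.List.len ((x0, y0) :: rest)) 1).map
          (fun i => PySem.List.pyGetD ((x0, y0) :: rest) i (0, 0)) = (x0, y0) :: rest :=
        PySem.List.map_pyGetD_pyRange_zero _ _
      simp only [List.nil_append, pv_map_fst_of hx, pv_map_snd_of hx, List.map_cons,
        PySem.List.max?_id_cons, PySem.List.min?_id_cons, Option.getD_some,
        pv_sorted_head, pv_sorted_last]
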